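-- pv_equiv track=rewrite | github.com/snickerdudle/advent_of_code_2022 | day_8/day_8.py | get_visibility_mask
-- ===== SOURCE A (Python) =====
-- def get_visibility_mask(data):
--   """Returns the highest trees seen at every point."""
--   mask = [[True for c in range(len(data[0]))] for r in range(len(data))]
--
--   # Start left-to-right
--   for r in range(len(data)):
--     cur_max = -float('inf')
--     for c in range(len(data[r])):
--       mask[r][c] = (data[r][c] <= cur_max) and mask[r][c]
--       cur_max = max(cur_max, data[r][c])
--   # Then right-to-left
--   for r in range(len(data)):
--     cur_max = -float('inf')
--     for c in range(len(data[r]) - 1, -1, -1):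
--       mask[r][c] = (data[r][c] <= cur_max) and mask[r][c]
--       cur_max = max(cur_max, data[r][c])
--   # Up to down
--   for c in range(len(data[0])):
--     cur_max = -float('inf')
--     for r in range(len(data)):
--       mask[r][c] = (data[r][c] <= cur_max) and mask[r][c]
--       cur_max = max(cur_max, data[r][c])
--   # Then right-to-left
--   for c in range(len(data[0])):
--     cur_max = -float('inf')
--     for r in range(len(data) - 1, -1, -1):
--       mask[r][c] = (data[r][c] <= cur_max) and mask[r][c]
--       cur_max = max(cur_max, data[r][c])
--   return mask
-- ===== SOURCE B (Python) =====
-- def get_visibility_mask(data):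
--   """Returns the highest trees seen at every point."""
--   mask = []
--   for r in range(len(data)):
--     row = []
--     for c in range(len(data[r])):
--       h = data[r][c]
--       left = any(data[r][k] >= h for k in range(c))
--       right = any(data[r][k] >= h for k in range(c + 1, len(data[r])))
--       up = any(data[k][c] >= h for k in range(r))
--       down = any(data[k][c] >= h for k in range(r + 1, len(data)))
--       row.append(left and right and up and down)
--     mask.append(row)
--   return mask
-- ===== Notes on version B (the rewrite author's own statement) =====
-- stated objective: alternative
-- what changed: Replaces A's four stateful in-place masking sweeps (running cur_max per row/column in both directions) with a direct per-cell computation that scans the four directions from each cell for a blocking tree of equal-or-greater height.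
-- outside the precondition, e.g. on get_visibility_mask([]): A raises IndexError, B returns []
import Mathlib
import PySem

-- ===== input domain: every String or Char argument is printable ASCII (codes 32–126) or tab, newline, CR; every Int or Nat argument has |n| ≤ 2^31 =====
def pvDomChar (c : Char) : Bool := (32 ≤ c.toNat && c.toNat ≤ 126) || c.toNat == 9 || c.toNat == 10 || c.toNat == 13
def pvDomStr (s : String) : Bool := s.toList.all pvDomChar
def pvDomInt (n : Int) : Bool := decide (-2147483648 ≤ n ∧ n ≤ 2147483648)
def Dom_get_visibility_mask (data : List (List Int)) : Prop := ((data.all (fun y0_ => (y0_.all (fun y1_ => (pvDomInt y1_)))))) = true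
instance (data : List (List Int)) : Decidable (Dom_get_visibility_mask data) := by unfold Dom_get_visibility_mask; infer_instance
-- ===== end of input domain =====

-- B replaces A's four in-place masking sweeps by a direct per-cell computation
-- (each cell scans its four directions for a blocking tree); objective: alternative.


-- ===== PORT A =====
-- data[r][c] (only used at in-range indices on inputs satisfying Pre_)
def pvCell (data : List (List Int)) (r c : Nat) : Int := (data.getD r []).getD c 0

-- 'x <= cur_max' where cur_max starts as -float('inf') (= none)
def pyLe (x : Int) (m : Option Int) : Bool :=
  match m with
  | none => false
  | some v => x ≤ v

-- 'max(cur_max, x)'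
def pyMax (m : Option Int) (x : Int) : Option Int :=
  some (match m with
        | none => x
        | some v => max v x)

-- one sweep of A along one line of the grid: for k in ks:
--   mask[pos k] = (f k <= cur_max) and mask[pos k]; cur_max = max(cur_max, f k)
def lineAux (pos : Nat → Nat × Nat) (f : Nat → Int) (ks : List Nat)
    (m : List (List Bool)) (cm : Option Int) : List (List Bool) × Option Int :=
  ks.foldl (fun p k =>
      (p.1.modify (pos k).1 (fun row => row.modify (pos k).2 (fun b => pyLe (f k) p.2 && b)),
       pyMax p.2 (f k))) (m, cm)

-- a row sweep (r fixed, c runs over cs) with cur_max starting at -inf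
def hPass (data : List (List Int)) (r : Nat) (cs : List Nat) (m : List (List Bool)) :
    List (List Bool) :=
  (lineAux (fun c => (r, c)) (fun c => pvCell data r c) cs m none).1

-- a column sweep (c fixed, r runs over rs) with cur_max starting at -inf
def vPass (data : List (List Int)) (c : Nat) (rs : List Nat) (m : List (List Bool)) :
    List (List Bool) :=
  (lineAux (fun r => (r, c)) (fun r => pvCell data r c) rs m none).1

def get_visibility_mask (data : List (List Int)) : List (List Bool) :=
  let rows := data.length
  let cols := (data.headD []).length          -- len(data[0]); Pre_ excludes data = []
  let m0 := List.replicate rows (List.replicate cols true)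
  -- left-to-right
  let m1 := (List.range rows).foldl (fun m r => hPass data r (List.range (data.getD r []).length) m) m0
  -- right-to-left
  let m2 := (List.range rows).foldl (fun m r => hPass data r (List.range (data.getD r []).length).reverse m) m1
  -- up-to-down
  let m3 := (List.range cols).foldl (fun m c => vPass data c (List.range rows) m) m2
  -- down-to-up
  (List.range cols).foldl (fun m c => vPass data c (List.range rows).reverse m) m3

-- ===== PORT B =====
def get_visibility_mask_alt (data : List (List Int)) : List (List Bool) :=
  (List.range data.length).map (fun r =>
    (List.range (data.getD r []).length).map (fun c =>
      let h := pvCell data r c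
      ((List.range c).any (fun k => h ≤ pvCell data r k)) &&
      (((List.range' (c + 1) ((data.getD r []).length - (c + 1))).any (fun k => h ≤ pvCell data r k)) &&
       (((List.range r).any (fun k => h ≤ pvCell data k c)) &&
        ((List.range' (r + 1) (data.length - (r + 1))).any (fun k => h ≤ pvCell data k c))))))

-- ===== PRECONDITION & SPEC =====
-- Pre_ excludes exactly the inputs on which A raises: data = [] (len(data[0]) is an
-- IndexError) and ragged grids (some row's length ≠ len(data[0]), which A indexes past).
def Pre_get_visibility_mask (data : List (List Int)) : Prop :=
  data ≠ [] ∧ ∀ row ∈ data, row.length = (data.headD []).length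
instance (data : List (List Int)) : Decidable (Pre_get_visibility_mask data) := by
  unfold Pre_get_visibility_mask; infer_instance

def pvWitness_get_visibility_mask : List (List Int) := [[1, 2, 3], [2, 2, 0], [5, 1, 4]]

def Spec_get_visibility_mask (data : List (List Int)) (out : List (List Bool)) : Prop :=
  out = get_visibility_mask_alt data
instance (data : List (List Int)) (out : List (List Bool)) : Decidable (Spec_get_visibility_mask data out) := by
  unfold Spec_get_visibility_mask; infer_instance

-- ===== CLAIM (what is proved, stated in full; the proofs are below) =====
def Claim_equal_get_visibility_mask : Prop := ∀ (data : List (List Int)), Dom_get_visibility_mask data → Pre_get_visibility_mask data → Spec_get_visibility_mask data (get_visibility_mask data)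

-- ===== LEMMAS AND PROOFS =====

-- total cell accessor for masks
def getCell (m : List (List Bool)) (r c : Nat) : Bool := (m.getD r []).getD c false

-- the value cur_max has when the sweep over ks (starting from cm) reaches k'
def cmAt (cm : Option Int) (f : Nat → Int) (ks : List Nat) (k' : Nat) : Option Int :=
  match ks with
  | [] => cm
  | k :: ks => if k = k' then cm else cmAt (pyMax cm (f k)) f ks k'

theorem getD_modify {α : Type} (l : List α) (i : Nat) (f : α → α) (j : Nat) (d : α) :
    (l.modify i f).getD j d =
      if i = j ∧ j < l.length then f (l.getD j d) else l.getD j d := by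
  by_cases hj : j < l.length
  · rw [List.getD_eq_getElem l d hj,
      List.getD_eq_getElem _ d (by simpa using hj), List.getElem_modify]
    by_cases hij : i = j <;> simp [hij, hj]
  · have h1 : (l.modify i f).getD j d = d :=
      List.getD_eq_default _ _ (by simpa using (by omega : l.length ≤ j))
    have h2 : l.getD j d = d := List.getD_eq_default _ _ (by omega)
    rw [h1, h2, if_neg (fun hc => hj hc.2)]

theorem lineAux_cons (pos : Nat → Nat × Nat) (f : Nat → Int) (k : Nat) (ks : List Nat)
    (m : List (List Bool)) (cm : Option Int) :
    lineAux pos f (k :: ks) m cm =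
      lineAux pos f ks
        (m.modify (pos k).1 (fun row => row.modify (pos k).2 (fun b => pyLe (f k) cm && b)))
        (pyMax cm (f k)) := rfl

theorem getCell_modify (m : List (List Bool)) (r0 c0 : Nat) (g : Bool → Bool) (r' c' : Nat)
    (h : (r0, c0) ≠ (r', c')) :
    getCell (m.modify r0 (fun row => row.modify c0 g)) r' c' = getCell m r' c' := by
  unfold getCell
  rw [getD_modify]
  split
  · rename_i hc
    rw [getD_modify]
    split
    · rename_i hc2
      exact absurd (by simp [hc.1, hc2.1]) h
    · rfl
  · rfl

theorem length_lineAux (pos : Nat → Nat × Nat) (f : Nat → Int) (ks : List Nat)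
    (m : List (List Bool)) (cm : Option Int) :
    (lineAux pos f ks m cm).1.length = m.length := by
  induction ks generalizing m cm with
  | nil => rfl
  | cons k ks ih =>
    rw [lineAux_cons]
    exact (ih _ _).trans (by simp)

theorem rowlen_lineAux (pos : Nat → Nat × Nat) (f : Nat → Int) (ks : List Nat)
    (m : List (List Bool)) (cm : Option Int) (j : Nat) :
    ((lineAux pos f ks m cm).1.getD j []).length = (m.getD j []).length := by
  induction ks generalizing m cm with
  | nil => rfl
  | cons k ks ih =>
    rw [lineAux_cons]
    refine (ih _ _).trans ?_
    rw [getD_modify]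
    split
    · simp
    · rfl

theorem lineAux_get_other (pos : Nat → Nat × Nat) (f : Nat → Int) (ks : List Nat)
    (m : List (List Bool)) (cm : Option Int) (r' c' : Nat)
    (h : ∀ k ∈ ks, pos k ≠ (r', c')) :
    getCell (lineAux pos f ks m cm).1 r' c' = getCell m r' c' := by
  induction ks generalizing m cm with
  | nil => rfl
  | cons k ks ih =>
    rw [lineAux_cons]
    refine (ih _ _ (fun a ha => h a (List.mem_cons_of_mem _ ha))).trans ?_
    exact getCell_modify _ _ _ _ _ _ (by simpa using h k (List.mem_cons_self ..))

theorem lineAux_get (pos : Nat → Nat × Nat) (f : Nat → Int) (ks : List Nat)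
    (hnd : ks.Nodup) (hinj : ∀ a b, pos a = pos b → a = b)
    (m : List (List Bool)) (cm : Option Int) (k' : Nat) (hk : k' ∈ ks)
    (hb1 : (pos k').1 < m.length) (hb2 : (pos k').2 < (m.getD (pos k').1 []).length) :
    getCell (lineAux pos f ks m cm).1 (pos k').1 (pos k').2 =
      (pyLe (f k') (cmAt cm f ks k') && getCell m (pos k').1 (pos k').2) := by
  induction ks generalizing m cm with
  | nil => cases hk
  | cons k ks ih =>
    rw [lineAux_cons]
    have hnd' := hnd.of_cons
    by_cases hkk : k = k'
    · subst hkk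
      have hnot : k ∉ ks := (List.nodup_cons.mp hnd).1
      have hother : ∀ a ∈ ks, pos a ≠ ((pos k).1, (pos k).2) := by
        intro a ha hcontra
        exact hnot (by rw [hinj a k (by simpa using hcontra)] at ha; exact ha)
      rw [lineAux_get_other pos f ks _ _ _ _ hother]
      unfold getCell
      rw [getD_modify, if_pos ⟨rfl, hb1⟩, getD_modify, if_pos ⟨rfl, hb2⟩]
      simp [cmAt]
    · have hne : pos k ≠ pos k' := fun hc => hkk (hinj k k' hc)
      have hk' : k' ∈ ks := by
        cases hk with
        | head => exact absurd rfl hkk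
        | tail _ h => exact h
      have hb1' : (pos k').1 < (m.modify (pos k).1 (fun row => row.modify (pos k).2 (fun b => pyLe (f k) cm && b))).length := by
        simpa using hb1
      have hb2' : (pos k').2 < ((m.modify (pos k).1 (fun row => row.modify (pos k).2 (fun b => pyLe (f k) cm && b))).getD (pos k').1 []).length := by
        rw [getD_modify]
        split
        · simpa using hb2
        · exact hb2
      rw [ih hnd' _ _ hk' hb1' hb2']
      congr 1
      · rw [cmAt, if_neg hkk]
      · exact getCell_modify _ _ _ _ _ _ (by
          intro hc
          exact hne (by rw [show ((pos k').1, (pos k').2) = pos k' from rfl] at hc; exact hc))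

theorem length_hPass (data : List (List Int)) (r : Nat) (cs : List Nat) (m : List (List Bool)) :
    (hPass data r cs m).length = m.length := length_lineAux _ _ _ _ _

theorem rowlen_hPass (data : List (List Int)) (r : Nat) (cs : List Nat) (m : List (List Bool)) (j : Nat) :
    ((hPass data r cs m).getD j []).length = (m.getD j []).length := rowlen_lineAux _ _ _ _ _ _

theorem length_vPass (data : List (List Int)) (c : Nat) (rs : List Nat) (m : List (List Bool)) :
    (vPass data c rs m).length = m.length := length_lineAux _ _ _ _ _

theorem rowlen_vPass (data : List (List Int)) (c : Nat) (rs : List Nat) (m : List (List Bool)) (j : Nat) :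
    ((vPass data c rs m).getD j []).length = (m.getD j []).length := rowlen_lineAux _ _ _ _ _ _

theorem getCell_hPass (data : List (List Int)) (r : Nat) (cs : List Nat) (m : List (List Bool))
    (r' c' : Nat) (hnd : cs.Nodup) (hb1 : r' < m.length) (hb2 : c' < (m.getD r' []).length) :
    getCell (hPass data r cs m) r' c' =
      if r = r' ∧ c' ∈ cs then
        pyLe (pvCell data r c') (cmAt none (fun k => pvCell data r k) cs c') && getCell m r' c'
      else getCell m r' c' := by
  by_cases hcase : r = r' ∧ c' ∈ cs
  · obtain ⟨rfl, hc⟩ := hcase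
    rw [if_pos ⟨rfl, hc⟩]
    exact lineAux_get _ _ cs hnd (fun a b hab => by injection hab) m none c' hc hb1 hb2
  · rw [if_neg hcase]
    apply lineAux_get_other
    intro k hkm hkc
    apply hcase
    injection hkc with h1 h2
    exact ⟨h1, h2 ▸ hkm⟩

theorem getCell_vPass (data : List (List Int)) (c : Nat) (rs : List Nat) (m : List (List Bool))
    (r' c' : Nat) (hnd : rs.Nodup) (hb1 : r' < m.length) (hb2 : c' < (m.getD r' []).length) :
    getCell (vPass data c rs m) r' c' =
      if c = c' ∧ r' ∈ rs then
        pyLe (pvCell data r' c) (cmAt none (fun k => pvCell data k c) rs r') && getCell m r' c'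
      else getCell m r' c' := by
  by_cases hcase : c = c' ∧ r' ∈ rs
  · obtain ⟨rfl, hr⟩ := hcase
    rw [if_pos ⟨rfl, hr⟩]
    exact lineAux_get _ _ rs hnd (fun a b hab => by injection hab) m none r' hr hb1 hb2
  · rw [if_neg hcase]
    apply lineAux_get_other
    intro k hkm hkc
    apply hcase
    injection hkc with h1 h2
    exact ⟨h2, h1 ▸ hkm⟩

theorem length_foldl_hPass (data : List (List Int)) (g : Nat → List Nat) (rs : List Nat)
    (m : List (List Bool)) :
    (rs.foldl (fun m r => hPass data r (g r) m) m).length = m.length := by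
  induction rs generalizing m with
  | nil => rfl
  | cons r rs ih => exact (ih _).trans (length_hPass ..)

theorem rowlen_foldl_hPass (data : List (List Int)) (g : Nat → List Nat) (rs : List Nat)
    (m : List (List Bool)) (j : Nat) :
    ((rs.foldl (fun m r => hPass data r (g r) m) m).getD j []).length = (m.getD j []).length := by
  induction rs generalizing m with
  | nil => rfl
  | cons r rs ih => exact (ih _).trans (rowlen_hPass ..)

theorem length_foldl_vPass (data : List (List Int)) (g : Nat → List Nat) (cs : List Nat)
    (m : List (List Bool)) :
    (cs.foldl (fun m c => vPass data c (g c) m) m).length = m.length := by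
  induction cs generalizing m with
  | nil => rfl
  | cons c cs ih => exact (ih _).trans (length_vPass ..)

theorem rowlen_foldl_vPass (data : List (List Int)) (g : Nat → List Nat) (cs : List Nat)
    (m : List (List Bool)) (j : Nat) :
    ((cs.foldl (fun m c => vPass data c (g c) m) m).getD j []).length = (m.getD j []).length := by
  induction cs generalizing m with
  | nil => rfl
  | cons c cs ih => exact (ih _).trans (rowlen_vPass ..)

theorem getCell_foldl_hPass (data : List (List Int)) (g : Nat → List Nat)
    (hg : ∀ r, (g r).Nodup) (rs : List Nat) (hnd : rs.Nodup) (m : List (List Bool))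
    (r' c' : Nat) (hb1 : r' < m.length) (hb2 : c' < (m.getD r' []).length) :
    getCell (rs.foldl (fun m r => hPass data r (g r) m) m) r' c' =
      if r' ∈ rs ∧ c' ∈ g r' then
        pyLe (pvCell data r' c') (cmAt none (fun k => pvCell data r' k) (g r') c') && getCell m r' c'
      else getCell m r' c' := by
  induction rs generalizing m with
  | nil => simp
  | cons r rs ih =>
    rw [List.foldl_cons]
    have hb1' : r' < (hPass data r (g r) m).length := by rw [length_hPass]; exact hb1
    have hb2' : c' < ((hPass data r (g r) m).getD r' []).length := by rw [rowlen_hPass]; exact hb2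
    rw [ih hnd.of_cons _ hb1' hb2',
      getCell_hPass data r (g r) m r' c' (hg r) hb1 hb2]
    by_cases hrr : r = r'
    · subst hrr
      have hnot : r ∉ rs := (List.nodup_cons.mp hnd).1
      by_cases hcc : c' ∈ g r
      · simp [hnot, hcc]
      · simp [hnot, hcc]
    · have hmem : r' ∈ r :: rs ↔ r' ∈ rs := by
        rw [List.mem_cons]
        exact or_iff_right (fun h => hrr h.symm)
      by_cases hrs : r' ∈ rs ∧ c' ∈ g r'
      · simp [hrs, hmem, hrr]
      · simp only [hmem, if_neg hrs]
        rw [if_neg (show ¬(r = r' ∧ c' ∈ g r) from fun hc => hrr hc.1)]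

theorem getCell_foldl_vPass (data : List (List Int)) (g : Nat → List Nat)
    (hg : ∀ c, (g c).Nodup) (cs : List Nat) (hnd : cs.Nodup) (m : List (List Bool))
    (r' c' : Nat) (hb1 : r' < m.length) (hb2 : c' < (m.getD r' []).length) :
    getCell (cs.foldl (fun m c => vPass data c (g c) m) m) r' c' =
      if c' ∈ cs ∧ r' ∈ g c' then
        pyLe (pvCell data r' c') (cmAt none (fun k => pvCell data k c') (g c') r') && getCell m r' c'
      else getCell m r' c' := by
  induction cs generalizing m with
  | nil => simp
  | cons c cs ih =>
    rw [List.foldl_cons]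
    have hb1' : r' < (vPass data c (g c) m).length := by rw [length_vPass]; exact hb1
    have hb2' : c' < ((vPass data c (g c) m).getD r' []).length := by rw [rowlen_vPass]; exact hb2
    rw [ih hnd.of_cons _ hb1' hb2',
      getCell_vPass data c (g c) m r' c' (hg c) hb1 hb2]
    by_cases hcc : c = c'
    · subst hcc
      have hnot : c ∉ cs := (List.nodup_cons.mp hnd).1
      by_cases hrr : r' ∈ g c
      · simp [hnot, hrr]
      · simp [hnot, hrr]
    · have hmem : c' ∈ c :: cs ↔ c' ∈ cs := by
        rw [List.mem_cons]
        exact or_iff_right (fun h => hcc h.symm)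
      by_cases hcs : c' ∈ cs ∧ r' ∈ g c'
      · simp [hcs, hmem, hcc]
      · simp only [hmem, if_neg hcs]
        rw [if_neg (show ¬(c = c' ∧ r' ∈ g c) from fun hc => hcc hc.1)]

theorem cmAt_append (cm : Option Int) (f : Nat → Int) (ks1 ks2 : List Nat) (k' : Nat)
    (h : k' ∉ ks1) :
    cmAt cm f (ks1 ++ k' :: ks2) k' = ks1.foldl (fun cm k => pyMax cm (f k)) cm := by
  induction ks1 generalizing cm with
  | nil => simp [cmAt]
  | cons a ks1 ih =>
    rw [List.cons_append, cmAt,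
      if_neg (show ¬ a = k' from fun hc => h (List.mem_cons.mpr (Or.inl hc.symm))), List.foldl_cons]
    exact ih _ (fun hc => h (List.mem_cons_of_mem _ hc))

theorem pyLe_pyMax (h0 x : Int) (cm : Option Int) :
    pyLe h0 (pyMax cm x) = (pyLe h0 cm || decide (h0 ≤ x)) := by
  cases cm with
  | none => simp [pyLe, pyMax]
  | some v => simp [pyLe, pyMax]

theorem pyLe_foldl (h0 : Int) (f : Nat → Int) (ks : List Nat) (cm : Option Int) :
    pyLe h0 (ks.foldl (fun cm k => pyMax cm (f k)) cm) =
      (pyLe h0 cm || ks.any (fun k => h0 ≤ f k)) := by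
  induction ks generalizing cm with
  | nil => simp
  | cons k ks ih =>
    rw [List.foldl_cons, ih, pyLe_pyMax, List.any_cons, Bool.or_assoc]

theorem range_decomp (c n : Nat) (h : c < n) :
    List.range n = List.range c ++ c :: List.range' (c + 1) (n - (c + 1)) := by
  rw [List.range_eq_range', show n = c + (1 + (n - (c + 1))) by omega, ← List.range'_append]
  have h2 : (1 + (n - (c + 1))) = (n - (c + 1)) + 1 := by omega
  have h3 : c + (n - (c + 1) + 1) - (c + 1) = n - (c + 1) := by omega
  simp [List.range'_succ, h2, h3, List.range_eq_range']

theorem reverse_range_decomp (c n : Nat) (h : c < n) :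
    (List.range n).reverse =
      (List.range' (c + 1) (n - (c + 1))).reverse ++ c :: (List.range c).reverse := by
  rw [range_decomp c n h]
  simp

-- directional blocking values: what cur_max-based masking contributes at (r, c)
theorem pyLe_cmAt_range (f : Nat → Int) (c n : Nat) (h : c < n) :
    pyLe (f c) (cmAt none f (List.range n) c) = (List.range c).any (fun k => f c ≤ f k) := by
  rw [range_decomp c n h, cmAt_append _ _ _ _ _ (by simp), pyLe_foldl]
  simp [pyLe]

theorem pyLe_cmAt_range_rev (f : Nat → Int) (c n : Nat) (h : c < n) :
    pyLe (f c) (cmAt none f (List.range n).reverse c) =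
      (List.range' (c + 1) (n - (c + 1))).any (fun k => f c ≤ f k) := by
  rw [reverse_range_decomp c n h,
    cmAt_append _ _ _ _ _ (by
      intro hc
      rw [List.mem_reverse] at hc
      have := (List.mem_range'_1.mp hc).1
      omega),
    pyLe_foldl]
  simp [pyLe]

theorem ext2 (a b : List (List Bool)) (h1 : a.length = b.length)
    (h2 : ∀ r, r < a.length → (a.getD r []).length = (b.getD r []).length)
    (h3 : ∀ r c, r < a.length → c < (a.getD r []).length → getCell a r c = getCell b r c) :
    a = b := by
  apply List.ext_getElem h1
  intro i hi hib
  apply List.ext_getElem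
  · rw [← List.getD_eq_getElem a [] hi, ← List.getD_eq_getElem b [] hib]
    exact h2 i hi
  · intro j hj hjb
    have h := h3 i j hi (by rwa [List.getD_eq_getElem a [] hi])
    unfold getCell at h
    rwa [List.getD_eq_getElem a [] hi, List.getD_eq_getElem b [] hib,
      List.getD_eq_getElem _ false hj, List.getD_eq_getElem _ false hjb] at h

-- shorthand for A's four sweeps, with the lets of the port unfolded
theorem A_unfold (data : List (List Int)) :
    get_visibility_mask data =
      (List.range ((data.headD []).length)).foldl
        (fun m c => vPass data c (List.range data.length).reverse m)
        ((List.range ((data.headD []).length)).foldl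
          (fun m c => vPass data c (List.range data.length) m)
          ((List.range data.length).foldl
            (fun m r => hPass data r (List.range (data.getD r []).length).reverse m)
            ((List.range data.length).foldl
              (fun m r => hPass data r (List.range (data.getD r []).length) m)
              (List.replicate data.length (List.replicate (data.headD []).length true))))) := rfl

theorem B_cell (data : List (List Int)) (r c : Nat) (hr : r < data.length)
    (hc : c < (data.getD r []).length) :
    getCell (get_visibility_mask_alt data) r c =
      (((List.range c).any (fun k => pvCell data r c ≤ pvCell data r k)) &&
       (((List.range' (c + 1) ((data.getD r []).length - (c + 1))).any (fun k => pvCell data r c ≤ pvCell data r k)) &&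
        (((List.range r).any (fun k => pvCell data r c ≤ pvCell data k c)) &&
         ((List.range' (r + 1) (data.length - (r + 1))).any (fun k => pvCell data r c ≤ pvCell data k c))))) := by
  unfold getCell get_visibility_mask_alt
  rw [PySem.List.getD_map_range _ _ _ _ hr, PySem.List.getD_map_range _ _ _ _ hc]

-- ===== VERDICT (by name: the statement is the Claim_ definition above) =====
theorem get_visibility_mask_spec : Claim_equal_get_visibility_mask := by
  intro data _ hpre
  obtain ⟨hne, hrect⟩ := hpre
  unfold Spec_get_visibility_mask
  have hlen : ∀ r, r < data.length → (data.getD r []).length = (data.headD []).length := by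
    intro r hr
    rw [List.getD_eq_getElem _ _ hr]
    exact hrect _ (List.getElem_mem hr)
  rw [A_unfold]
  -- shapes of the intermediate masks
  have h0len : (List.replicate data.length (List.replicate (data.headD []).length true)).length = data.length := by simp
  have h0row : ∀ j, j < data.length →
      ((List.replicate data.length (List.replicate (data.headD []).length true)).getD j []).length
        = (data.headD []).length := by
    intro j hj
    rw [List.getD_eq_getElem _ _ (by simpa using hj), List.getElem_replicate]
    simp
  have h1len := length_foldl_hPass data (fun r => List.range (data.getD r []).length)
    (List.range data.length) (List.replicate data.length (List.replicate (data.headD []).length true))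
  have h1row := rowlen_foldl_hPass data (fun r => List.range (data.getD r []).length)
    (List.range data.length) (List.replicate data.length (List.replicate (data.headD []).length true))
  have h2len := length_foldl_hPass data (fun r => (List.range (data.getD r []).length).reverse)
    (List.range data.length) ((List.range data.length).foldl (fun m r => hPass data r (List.range (data.getD r []).length) m) (List.replicate data.length (List.replicate (data.headD []).length true)))
  have h2row := rowlen_foldl_hPass data (fun r => (List.range (data.getD r []).length).reverse)
    (List.range data.length) ((List.range data.length).foldl (fun m r => hPass data r (List.range (data.getD r []).length) m) (List.replicate data.length (List.replicate (data.headD []).length true)))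
  have h3len := length_foldl_vPass data (fun _ => List.range data.length)
    (List.range (data.headD []).length) ((List.range data.length).foldl (fun m r => hPass data r (List.range (data.getD r []).length).reverse m) ((List.range data.length).foldl (fun m r => hPass data r (List.range (data.getD r []).length) m) (List.replicate data.length (List.replicate (data.headD []).length true))))
  have h3row := rowlen_foldl_vPass data (fun _ => List.range data.length)
    (List.range (data.headD []).length) ((List.range data.length).foldl (fun m r => hPass data r (List.range (data.getD r []).length).reverse m) ((List.range data.length).foldl (fun m r => hPass data r (List.range (data.getD r []).length) m) (List.replicate data.length (List.replicate (data.headD []).length true))))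
  apply ext2
  · rw [length_foldl_vPass, h3len, h2len, h1len, h0len]
    unfold get_visibility_mask_alt
    simp
  · intro r hr
    rw [length_foldl_vPass, h3len, h2len, h1len, h0len] at hr
    rw [rowlen_foldl_vPass, h3row, h2row, h1row, h0row r hr]
    unfold get_visibility_mask_alt
    rw [PySem.List.getD_map_range _ _ _ _ hr]
    simpa using (hlen r hr).symm
  · intro r c hr hc
    rw [length_foldl_vPass, h3len, h2len, h1len, h0len] at hr
    rw [rowlen_foldl_vPass, h3row, h2row, h1row, h0row r hr] at hc
    -- bounds for every intermediate mask
    have hb3l : r < ((List.range (data.headD []).length).foldl (fun m c => vPass data c (List.range data.length) m) ((List.range data.length).foldl (fun m r => hPass data r (List.range (data.getD r []).length).reverse m) ((List.range data.length).foldl (fun m r => hPass data r (List.range (data.getD r []).length) m) (List.replicate data.length (List.replicate (data.headD []).length true))))).length := by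
      rw [h3len, h2len, h1len, h0len]; exact hr
    have hb3r : c < (((List.range (data.headD []).length).foldl (fun m c => vPass data c (List.range data.length) m) ((List.range data.length).foldl (fun m r => hPass data r (List.range (data.getD r []).length).reverse m) ((List.range data.length).foldl (fun m r => hPass data r (List.range (data.getD r []).length) m) (List.replicate data.length (List.replicate (data.headD []).length true))))).getD r []).length := by
      rw [h3row, h2row, h1row, h0row r hr]; exact hc
    have hb2l : r < ((List.range data.length).foldl (fun m r => hPass data r (List.range (data.getD r []).length).reverse m) ((List.range data.length).foldl (fun m r => hPass data r (List.range (data.getD r []).length) m) (List.replicate data.length (List.replicate (data.headD []).length true)))).length := by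
      rw [h2len, h1len, h0len]; exact hr
    have hb2r : c < (((List.range data.length).foldl (fun m r => hPass data r (List.range (data.getD r []).length).reverse m) ((List.range data.length).foldl (fun m r => hPass data r (List.range (data.getD r []).length) m) (List.replicate data.length (List.replicate (data.headD []).length true)))).getD r []).length := by
      rw [h2row, h1row, h0row r hr]; exact hc
    have hb1l : r < ((List.range data.length).foldl (fun m r => hPass data r (List.range (data.getD r []).length) m) (List.replicate data.length (List.replicate (data.headD []).length true))).length := by
      rw [h1len, h0len]; exact hr
    have hb1r : c < (((List.range data.length).foldl (fun m r => hPass data r (List.range (data.getD r []).length) m) (List.replicate data.length (List.replicate (data.headD []).length true))).getD r []).length := by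
      rw [h1row, h0row r hr]; exact hc
    have hb0l : r < (List.replicate data.length (List.replicate (data.headD []).length true)).length := by
      rw [h0len]; exact hr
    have hb0r : c < ((List.replicate data.length (List.replicate (data.headD []).length true)).getD r []).length := by
      rw [h0row r hr]; exact hc
    have hclen : c < (data.getD r []).length := by rw [hlen r hr]; exact hc
    -- peel the four sweeps
    rw [getCell_foldl_vPass data (fun _ => (List.range data.length).reverse)
        (fun _ => List.nodup_reverse.mpr (List.nodup_range)) _ (List.nodup_range) _ r c hb3l hb3r,
      if_pos ⟨by simpa using hc, by simpa using hr⟩,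
      pyLe_cmAt_range_rev (fun k => pvCell data k c) r data.length hr]
    rw [getCell_foldl_vPass data (fun _ => List.range data.length)
        (fun _ => List.nodup_range) _ (List.nodup_range) _ r c hb2l hb2r,
      if_pos ⟨by simpa using hc, by simpa using hr⟩,
      pyLe_cmAt_range (fun k => pvCell data k c) r data.length hr]
    rw [getCell_foldl_hPass data (fun r => (List.range (data.getD r []).length).reverse)
        (fun _ => List.nodup_reverse.mpr (List.nodup_range)) _ (List.nodup_range) _ r c hb1l hb1r,
      if_pos ⟨by simpa using hr, by simpa using hclen⟩,
      pyLe_cmAt_range_rev (fun k => pvCell data r k) c (data.getD r []).length hclen]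
    rw [getCell_foldl_hPass data (fun r => List.range (data.getD r []).length)
        (fun _ => List.nodup_range) _ (List.nodup_range) _ r c hb0l hb0r,
      if_pos ⟨by simpa using hr, by simpa using hclen⟩,
      pyLe_cmAt_range (fun k => pvCell data r k) c (data.getD r []).length hclen]
    -- the base mask is all-true
    have hrow0 : (List.replicate data.length (List.replicate (data.headD []).length true)).getD r []
        = List.replicate (data.headD []).length true := by
      rw [List.getD_eq_getElem _ _ (by simpa using hr)]
      simp
    have hg0 : getCell (List.replicate data.length (List.replicate (data.headD []).length true)) r c = true := by
      unfold getCell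
      rw [hrow0, List.getD_eq_getElem _ _ (by simpa using hc), List.getElem_replicate]
    rw [hg0, B_cell data r c hr hclen]
    -- reorder the four directional tests
    generalize ((List.range c).any fun k => pvCell data r c ≤ pvCell data r k) = L
    generalize ((List.range' (c + 1) ((data.getD r []).length - (c + 1))).any fun k => pvCell data r c ≤ pvCell data r k) = R
    generalize ((List.range r).any fun k => pvCell data r c ≤ pvCell data k c) = U
    generalize ((List.range' (r + 1) (data.length - (r + 1))).any fun k => pvCell data r c ≤ pvCell data k c) = D
    cases L <;> cases R <;> cases U <;> cases D <;> rfl
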